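-- pv_equiv track=rewrite | github.com/SCAI-JHU/SimWorld-Robotics | simworld_gym/baseline/single/utils.py | action_history_text
-- ===== SOURCE A (Python) =====
-- def action_history_text(action_history, action_mapping):
--     if len(action_history) == 0:
--         return ""
--     action_history_text = ""
--     current_action = None
--     n = 0
--     for action in action_history:
--         if current_action != action and current_action is not None:
--             action_history_text += f"{action_mapping[current_action]} for {n} times,\n" if n > 1 else f"{action_mapping[current_action]},\n"
--             current_action = action
--             n = 1
--         else:
--             current_action = action
--             n += 1
--     action_history_text += f"{action_mapping[current_action]} for {n} times\n" if n > 1 else f"{action_mapping[current_action]}\n"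
--     return action_history_text
-- ===== SOURCE B (Python) =====
-- def action_history_text(action_history, action_mapping):
--     if len(action_history) == 0:
--         return ""
--
--     def go(xs):
--         # recursive head-run decomposition: measure the leading run by index,
--         # slice it off, and recurse on what remains
--         k = xs[0]
--         c = 1
--         while c < len(xs) and xs[c] == k:
--             c += 1
--         part = f"{action_mapping[k]} for {c} times" if c > 1 else f"{action_mapping[k]}"
--         tail = xs[c:]
--         return part + "\n" if not tail else part + ",\n" + go(tail)
--
--     return go(action_history)
-- ===== Notes on version B (the rewrite author's own statement) =====
-- stated objective: alternative
-- what changed: Replaces A's iterative state machine (a running current_action/counter with emission interleaved into the scan and a duplicated final append) with a recursive head-run decomposition: each call measures the leading run by index, slices it off, formats it, and recurses on the remainder, choosing the separator by whether the tail is empty.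
import Mathlib
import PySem

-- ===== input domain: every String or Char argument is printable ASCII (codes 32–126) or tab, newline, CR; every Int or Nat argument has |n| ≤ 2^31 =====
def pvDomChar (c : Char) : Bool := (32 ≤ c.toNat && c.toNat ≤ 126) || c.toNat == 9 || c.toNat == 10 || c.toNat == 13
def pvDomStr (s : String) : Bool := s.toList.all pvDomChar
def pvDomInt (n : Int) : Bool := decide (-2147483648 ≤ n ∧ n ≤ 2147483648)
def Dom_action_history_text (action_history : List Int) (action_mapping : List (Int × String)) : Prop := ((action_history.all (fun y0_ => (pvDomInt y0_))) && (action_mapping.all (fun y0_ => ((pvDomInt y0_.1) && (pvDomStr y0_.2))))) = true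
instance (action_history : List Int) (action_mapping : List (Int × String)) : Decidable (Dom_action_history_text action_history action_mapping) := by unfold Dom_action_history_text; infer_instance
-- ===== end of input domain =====

-- ===== PORT A =====
-- B replaces A's iterative state machine with a recursive head-run decomposition (objective: alternative).
-- shared helper: Python dict lookup on the association list (first match); a missing key (KeyError) is excluded by Pre_.
def pvLookup : List (Int × String) → Int → String
  | [], _ => ""
  | (a, v) :: t, k => if a == k then v else pvLookup t k

def pvALoop (m : List (Int × String)) : List Int → Option Int → Int → String → String
  | [], cur, n, s =>
      s ++ (if n > 1 then pvLookup m (cur.getD 0) ++ " for " ++ PySem.Int.toStr n ++ " times\n"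
            else pvLookup m (cur.getD 0) ++ "\n")
  | a :: t, cur, n, s =>
      if cur ≠ some a ∧ cur ≠ none then
        pvALoop m t (some a) 1
          (s ++ (if n > 1 then pvLookup m (cur.getD 0) ++ " for " ++ PySem.Int.toStr n ++ " times,\n"
                 else pvLookup m (cur.getD 0) ++ ",\n"))
      else
        pvALoop m t (some a) (n + 1) s

def action_history_text (action_history : List Int) (action_mapping : List (Int × String)) : String :=
  if action_history.length == 0 then "" else pvALoop action_mapping action_history none 0 ""

-- ===== PORT B =====
-- the 'while c < len(xs) and xs[c] == k' index scan: number of leading elements of the tail equal to k (exact)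
def pvCountRun (k : Int) : List Int → Nat
  | [] => 0
  | x :: t => if x == k then pvCountRun k t + 1 else 0

-- go(xs): format the leading run, slice it off (xs[c:]), recurse on the remainder
def pvGo (m : List (Int × String)) : List Int → String
  | [] => ""
  | x :: xs =>
      let c : Nat := 1 + pvCountRun x xs
      let part : String :=
        if (c : Int) > 1 then pvLookup m x ++ " for " ++ PySem.Int.toStr (c : Int) ++ " times"
        else pvLookup m x
      let tail := xs.drop (c - 1)
      if tail.isEmpty then part ++ "\n" else part ++ ",\n" ++ pvGo m tail
  termination_by xs => xs.length
  decreasing_by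
    simp only [List.length_cons]
    calc (xs.drop (1 + pvCountRun x xs - 1)).length ≤ xs.length := by
            simp [List.length_drop]
      _ < xs.length + 1 := Nat.lt_succ_self _

def action_history_text_alt (action_history : List Int) (action_mapping : List (Int × String)) : String :=
  if action_history.length == 0 then "" else pvGo action_mapping action_history

-- ===== PRECONDITION & SPEC =====
-- Pre_ excludes histories containing an action with no entry in action_mapping, on which A raises KeyError.
def Pre_action_history_text (action_history : List Int) (action_mapping : List (Int × String)) : Prop :=
  ∀ x ∈ action_history, x ∈ action_mapping.map Prod.fst
instance (action_history : List Int) (action_mapping : List (Int × String)) : Decidable (Pre_action_history_text action_history action_mapping) := by unfold Pre_action_history_text; infer_instance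

def pvWitness_action_history_text : List Int × (List (Int × String)) := ([0, 0, 1], [(0, "move forward"), (1, "turn left")])

def Spec_action_history_text (action_history : List Int) (action_mapping : List (Int × String)) (out : String) : Prop := out = action_history_text_alt action_history action_mapping
instance (action_history : List Int) (action_mapping : List (Int × String)) (out : String) : Decidable (Spec_action_history_text action_history action_mapping out) := by unfold Spec_action_history_text; infer_instance

-- ===== CLAIM (what is proved, stated in full; the proofs are below) =====
def Claim_equal_action_history_text : Prop := ∀ (action_history : List Int) (action_mapping : List (Int × String)), Dom_action_history_text action_history action_mapping → Pre_action_history_text action_history action_mapping → Spec_action_history_text action_history action_mapping (action_history_text action_history action_mapping)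

-- ===== LEMMAS AND PROOFS =====
-- Proof plan: both sides are shown equal to a common run-list normal form
-- pvJoin ",\n" ((pvRunsAux t a 1).map (pvFmtRun m)) ++ "\n".
def pvRunsAux : List Int → Int → Int → List (Int × Int)
  | [], k, c => [(k, c)]
  | x :: t, k, c => if x == k then pvRunsAux t k (c + 1) else (k, c) :: pvRunsAux t x 1

def pvFmtRun (m : List (Int × String)) (p : Int × Int) : String :=
  if p.2 > 1 then pvLookup m p.1 ++ " for " ++ PySem.Int.toStr p.2 ++ " times" else pvLookup m p.1

def pvJoin (sep : String) : List String → String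
  | [] => ""
  | [x] => x
  | x :: y :: t => x ++ sep ++ pvJoin sep (y :: t)

theorem pvRunsAux_ne_nil (t : List Int) (k c : Int) : pvRunsAux t k c ≠ [] := by
  induction t generalizing k c with
  | nil => simp [pvRunsAux]
  | cons x t ih =>
    simp only [pvRunsAux]
    split
    · exact ih k (c + 1)
    · simp

theorem pvJoin_cons (sep x : String) (l : List String) (h : l ≠ []) :
    pvJoin sep (x :: l) = x ++ sep ++ pvJoin sep l := by
  cases l with
  | nil => exact absurd rfl h
  | cons y t => rfl

theorem pvALoop_eq_runs (m : List (Int × String)) (t : List Int) (k c : Int) (s : String) :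
    pvALoop m t (some k) c s
      = s ++ (pvJoin ",\n" ((pvRunsAux t k c).map (pvFmtRun m)) ++ "\n") := by
  induction t generalizing k c s with
  | nil =>
    simp only [pvALoop, pvRunsAux, List.map, pvJoin, pvFmtRun, Option.getD]
    split_ifs <;> simp [String.append_assoc]
  | cons a t ih =>
    simp only [pvALoop, pvRunsAux]
    by_cases hak : a = k
    · subst hak
      simp only [ne_eq, not_true_eq_false, false_and, if_false, beq_self_eq_true, if_true]
      exact ih a (c + 1) s
    · have hka : k ≠ a := fun h => hak h.symm
      have h1 : some k ≠ some a ∧ some k ≠ (none : Option Int) := ⟨by simpa using hka, by simp⟩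
      have h2 : ¬((a == k) = true) := by simpa using hak
      rw [if_pos h1, ih, if_neg h2]
      have hnn : (pvRunsAux t a 1).map (pvFmtRun m) ≠ [] := by
        simpa using pvRunsAux_ne_nil t a 1
      rw [List.map_cons, pvJoin_cons _ _ _ hnn]
      simp only [pvFmtRun, Option.getD]
      split_ifs <;> simp [String.append_assoc]

-- decomposition of the accumulated run list along the leading run
theorem pvRunsAux_decomp (t : List Int) (a : Int) (c : Int) :
    pvRunsAux t a c =
      match t.drop (pvCountRun a t) with
      | [] => [(a, c + pvCountRun a t)]
      | y :: ys => (a, c + pvCountRun a t) :: pvRunsAux ys y 1 := by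
  induction t generalizing a c with
  | nil => simp [pvRunsAux, pvCountRun]
  | cons x t ih =>
    by_cases hxa : x = a
    · subst hxa
      simp only [pvRunsAux, pvCountRun, beq_self_eq_true, if_true]
      rw [ih x (c + 1)]
      simp only [List.drop_succ_cons]
      cases t.drop (pvCountRun x t) <;> simp <;> omega
    · have h2 : ¬((x == a) = true) := by simpa using hxa
      simp [pvRunsAux, pvCountRun, h2]

theorem pvGo_eq_runs (m : List (Int × String)) :
    ∀ (n : Nat) (t : List Int), t.length ≤ n → ∀ a : Int,
      pvGo m (a :: t) = pvJoin ",\n" ((pvRunsAux t a 1).map (pvFmtRun m)) ++ "\n" := by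
  intro n
  induction n with
  | zero =>
    intro t ht a
    have : t = [] := List.length_eq_zero_iff.mp (Nat.le_zero.mp ht)
    subst this
    simp [pvGo, pvRunsAux, pvCountRun, pvJoin, pvFmtRun]
  | succ n ih =>
    intro t ht a
    rw [pvGo]
    have hdrop : 1 + pvCountRun a t - 1 = pvCountRun a t := by omega
    rw [pvRunsAux_decomp t a 1, hdrop]
    cases htl : t.drop (pvCountRun a t) with
    | nil =>
      simp only [List.isEmpty_nil, if_true, List.map, pvJoin, pvFmtRun]
      push_cast
      rfl
    | cons y ys =>
      have hys : ys.length ≤ n := by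
        have h1 : (t.drop (pvCountRun a t)).length ≤ t.length := by
          simp [List.length_drop]
        rw [htl] at h1
        simp only [List.length_cons] at h1
        omega
      simp only [List.isEmpty_cons, if_false, Bool.false_eq_true]
      rw [ih ys hys y]
      have hnn : (pvRunsAux ys y 1).map (pvFmtRun m) ≠ [] := by
        simpa using pvRunsAux_ne_nil ys y 1
      rw [List.map_cons, pvJoin_cons _ _ _ hnn]
      simp only [pvFmtRun]
      have hc : ((1 + pvCountRun a t : Nat) : Int) = 1 + (pvCountRun a t : Int) := by push_cast; ring
      simp only [hc]
      split_ifs <;> simp [String.append_assoc]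

-- ===== VERDICT (by name: the statement is the Claim_ definition above) =====
theorem action_history_text_spec : Claim_equal_action_history_text := by
  intro ah m _ _
  unfold Spec_action_history_text
  cases ah with
  | nil => rfl
  | cons a t =>
    simp only [action_history_text, action_history_text_alt, List.length_cons, pvALoop]
    rw [if_neg (by simp), if_neg (by simp)]
    rw [pvALoop_eq_runs, pvGo_eq_runs m t.length t (le_refl _) a]
    exact String.empty_append
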